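-- pv_equiv track=rewrite | github.com/wyk18703232953/myResearch | codeComplex/data copy/filteredData/python/cubic/python_cubic_0120.py | generate_case
-- ===== SOURCE A (Python) =====
-- def generate_case(k):
--     # Deterministically generate s, t from k
--     # Map k to lengths; ensure at least length 1 for t
--     len_s = max(1, k)
--     len_t = max(1, (k // 2) + 1)
--
--     # Simple deterministic alphabet
--     alphabet = "abc"
--
--     # Build s and t deterministically using modular arithmetic
--     s_chars = [alphabet[(i * 2 + 1) % len(alphabet)] for i in range(len_s)]
--     t_chars = [alphabet[(i * 3 + 2) % len(alphabet)] for i in range(len_t)]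
--
--     s = "".join(s_chars)
--     t = "".join(t_chars)
--     return s, t
-- ===== SOURCE B (Python) =====
-- def generate_case(k):
--     # Same lengths as A; s is the 3-periodic tile 'bac' cut to length, t is all 'c'
--     # (A's modular index (i*2+1)%3 cycles b,a,c; (i*3+2)%3 is constantly 2 -> 'c').
--     len_s = max(1, k)
--     len_t = max(1, (k // 2) + 1)
--     s = ('bac' * (len_s // 3 + 1))[:len_s]
--     t = 'c' * len_t
--     return s, t
-- ===== Notes on version B (the rewrite author's own statement) =====
-- stated objective: simpler
-- what changed: Replaces A's per-index modular arithmetic over two comprehensions with direct pattern construction: s is the period-3 tile 'bac' repeated and sliced to length, and t (whose modular index is constantly 2) is just 'c' * len_t.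
import Mathlib
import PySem

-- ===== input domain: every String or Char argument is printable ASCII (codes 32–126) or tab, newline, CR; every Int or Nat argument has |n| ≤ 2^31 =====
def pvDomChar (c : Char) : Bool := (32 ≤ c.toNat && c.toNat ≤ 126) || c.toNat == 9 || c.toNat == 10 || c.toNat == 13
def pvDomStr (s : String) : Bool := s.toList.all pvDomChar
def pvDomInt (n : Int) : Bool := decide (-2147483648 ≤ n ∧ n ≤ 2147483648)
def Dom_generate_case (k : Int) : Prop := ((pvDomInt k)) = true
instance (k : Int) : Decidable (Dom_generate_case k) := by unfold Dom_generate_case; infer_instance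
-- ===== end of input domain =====

-- ===== PORT A =====
-- B builds s by tiling the period-3 cycle 'bac' and t as all-'c' instead of A's
-- per-index modular arithmetic; objective: simpler. (Proved equal for all k in Dom.)
def generate_case (k : Int) : String × String :=
  let len_s : Int := max 1 k
  let len_t : Int := max 1 (PySem.Int.floordiv k 2 + 1)
  let alphabet : List Char := ['a', 'b', 'c']
  -- alphabet[(i*2+1) % len(alphabet)]: the index is always in 0..2, so the Python
  -- indexing never raises; pyGetD with an arbitrary default is exact here.
  let s_chars := (PySem.List.pyRange 0 len_s 1).map
    (fun i => PySem.List.pyGetD alphabet (PySem.Int.mod (i * 2 + 1) (alphabet.length : Int)) 'a')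
  let t_chars := (PySem.List.pyRange 0 len_t 1).map
    (fun i => PySem.List.pyGetD alphabet (PySem.Int.mod (i * 3 + 2) (alphabet.length : Int)) 'a')
  (String.ofList s_chars, String.ofList t_chars)

-- ===== PORT B =====
def generate_case_alt (k : Int) : String × String :=
  let len_s : Int := max 1 k
  let len_t : Int := max 1 (PySem.Int.floordiv k 2 + 1)
  -- 'bac' * (len_s // 3 + 1), then [:len_s]; both counts are ≥ 1, so repetition is
  -- List.replicate/flatten and the nonnegative-bound slice is List.take, exactly.
  let s := (List.replicate (PySem.Int.floordiv len_s 3 + 1).toNat ['b', 'a', 'c']).flatten.take len_s.toNat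
  let t := List.replicate len_t.toNat 'c'
  (String.ofList s, String.ofList t)

-- ===== PRECONDITION & SPEC =====
def Spec_generate_case (k : Int) (out : String × String) : Prop := out = generate_case_alt k
instance (k : Int) (out : String × String) : Decidable (Spec_generate_case k out) := by unfold Spec_generate_case; infer_instance

-- ===== CLAIM (what is proved, stated in full; the proofs are below) =====
def Claim_equal_generate_case : Prop := ∀ (k : Int), Dom_generate_case k → Spec_generate_case k (generate_case k)

-- ===== LEMMAS AND PROOFS =====

-- A's s-character at index j, as a function of j % 3: the cycle 'b','a','c'.
def pvCycle (j : Nat) : Char := if j % 3 = 0 then 'b' else if j % 3 = 1 then 'a' else 'c'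

theorem pvSChar_eq (j : Nat) :
    PySem.List.pyGetD ['a', 'b', 'c'] (PySem.Int.mod ((j : Int) * 2 + 1) 3) 'a' = pvCycle j := by
  have h1 : ((j : Int) * 2 + 1) = ((j * 2 + 1 : Nat) : Int) := by push_cast; ring
  rw [h1, show (3 : Int) = ((3 : Nat) : Int) from rfl, PySem.Int.mod_natCast,
    PySem.List.pyGetD_natCast]
  unfold pvCycle
  rcases (show j % 3 = 0 ∨ j % 3 = 1 ∨ j % 3 = 2 by omega) with h | h | h
  · rw [show (j * 2 + 1) % 3 = 1 from by omega]; simp [h]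
  · rw [show (j * 2 + 1) % 3 = 0 from by omega]; simp [h]
  · rw [show (j * 2 + 1) % 3 = 2 from by omega]; simp [h]

theorem pvTChar_eq (j : Nat) :
    PySem.List.pyGetD ['a', 'b', 'c'] (PySem.Int.mod ((j : Int) * 3 + 2) 3) 'a' = 'c' := by
  have h1 : ((j : Int) * 3 + 2) = ((j * 3 + 2 : Nat) : Int) := by push_cast; ring
  rw [h1, show (3 : Int) = ((3 : Nat) : Int) from rfl, PySem.Int.mod_natCast,
    PySem.List.pyGetD_natCast]
  have : (j * 3 + 2) % 3 = 2 := by omega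
  simp [this]

-- Tiling: mapping the cycle over a range that starts at a multiple of 3 is the flat tile.
theorem pvTile (cnt : Nat) : ∀ start : Nat, 3 ∣ start →
    (List.range' start (3 * cnt)).map pvCycle = (List.replicate cnt ['b', 'a', 'c']).flatten := by
  induction cnt with
  | zero => simp
  | succ c ih =>
    intro start hs
    obtain ⟨d, rfl⟩ := hs
    have hr : List.range' (3 * d) (3 * (c + 1)) =
        3 * d :: (3 * d + 1) :: (3 * d + 2) :: List.range' (3 * d + 3) (3 * c) := by
      rw [show 3 * (c + 1) = ((3 * c) + 1 + 1 + 1) from by ring]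
      simp [List.range'_succ]
    rw [hr]
    have h0 : pvCycle (3 * d) = 'b' := by unfold pvCycle; simp [Nat.mul_mod_right]
    have h1 : pvCycle (3 * d + 1) = 'a' := by
      unfold pvCycle; rw [show (3 * d + 1) % 3 = 1 from by omega]; norm_num
    have h2 : pvCycle (3 * d + 2) = 'c' := by
      unfold pvCycle; rw [show (3 * d + 2) % 3 = 2 from by omega]; norm_num
    simp only [List.map_cons, h0, h1, h2, List.replicate_succ, List.flatten_cons]
    rw [ih (3 * d + 3) ⟨d + 1, by ring⟩]
    rfl

theorem pvS_eq (n : Nat) :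
    (List.range n).map pvCycle =
      ((List.replicate (n / 3 + 1) ['b', 'a', 'c']).flatten).take n := by
  rw [← pvTile (n / 3 + 1) 0 ⟨0, rfl⟩, ← List.range_eq_range', ← List.map_take, List.take_range]
  have : min n (3 * (n / 3 + 1)) = n := by omega
  rw [this]

-- ===== VERDICT (by name: the statement is the Claim_ definition above) =====
theorem generate_case_spec : Claim_equal_generate_case := by
  intro k _
  unfold Spec_generate_case generate_case generate_case_alt
  have hs : (1 : Int) ≤ max 1 k := le_max_left _ _
  have ht : (1 : Int) ≤ max 1 (PySem.Int.floordiv k 2 + 1) := le_max_left _ _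
  obtain ⟨n, hn⟩ : ∃ n : Nat, max 1 k = (n : Int) := ⟨(max 1 k).toNat, by omega⟩
  obtain ⟨m, hm⟩ : ∃ m : Nat, max 1 (PySem.Int.floordiv k 2 + 1) = (m : Int) :=
    ⟨(max 1 (PySem.Int.floordiv k 2 + 1)).toNat, by omega⟩
  simp only [hn, hm, List.length_cons, List.length_nil]
  refine Prod.ext ?_ ?_
  · -- s: A's modular comprehension = B's tile-and-cut
    show String.ofList _ = String.ofList _
    congr 1
    rw [PySem.List.pyRange_zero_natCast, List.map_map]
    have : ((fun i => PySem.List.pyGetD ['a', 'b', 'c']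
        (PySem.Int.mod (i * 2 + 1) ((3 : Nat) : Int)) 'a') ∘ fun j : Nat => (j : Int)) = pvCycle := by
      funext j; exact pvSChar_eq j
    have hfd : (PySem.Int.floordiv (n : Int) 3 + 1).toNat = n / 3 + 1 := by
      rw [show (3 : Int) = ((3 : Nat) : Int) from rfl, PySem.Int.floordiv_natCast]; omega
    rw [this, pvS_eq, hfd, Int.toNat_natCast]
  · -- t: A's modular comprehension = B's replicate
    show String.ofList _ = String.ofList _
    congr 1
    rw [PySem.List.pyRange_zero_natCast, List.map_map]
    have : ((fun i => PySem.List.pyGetD ['a', 'b', 'c']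
        (PySem.Int.mod (i * 3 + 2) ((3 : Nat) : Int)) 'a') ∘ fun j : Nat => (j : Int)) =
        fun _ => 'c' := by
      funext j; exact pvTChar_eq j
    rw [this]
    simp [List.map_const', Int.toNat_natCast]
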